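-- pv_equiv track=rewrite | github.com/Sylwahan/yakuza_ps2xr | yak/talk/talk_chars.py | decode_char_section
-- ===== SOURCE A (Python) =====
-- def decode_char_section(char_tuple):
--     four_chars = [None]*4
--     four_chars[0] = []
--     four_chars[1] = []
--     four_chars[2] = []
--     four_chars[3] = []
--     first_chars = True
--     j = 0
--     for i in char_tuple:
--         if first_chars:
--             four_chars[0].append(i >> 0 & 0b11)
--             four_chars[2].append(i >> 2 & 0b11)
--             four_chars[0].append(i >> 4 & 0b11)
--             four_chars[2].append(i >> 6 & 0b11)
--         else:
--             four_chars[1].append(i >> 0 & 0b11)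
--             four_chars[3].append(i >> 2 & 0b11)
--             four_chars[1].append(i >> 4 & 0b11)
--             four_chars[3].append(i >> 6 & 0b11)
--         j += 1
--         if j % 6 == 0:
--             first_chars = not first_chars
--     return four_chars
-- ===== SOURCE B (Python) =====
-- def decode_char_section(char_tuple):
--     # Four independent filtered passes: block p//6 even -> channels 0/2, odd -> 1/3.
--     def channel(parity, s1, s2):
--         return [bits
--                 for p, x in enumerate(char_tuple)
--                 if (p // 6) % 2 == parity
--                 for bits in ((x >> s1) & 3, (x >> s2) & 3)]
--     return [channel(0, 0, 4), channel(1, 0, 4), channel(0, 2, 6), channel(1, 2, 6)]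
-- ===== Notes on version B (the rewrite author's own statement) =====
-- stated objective: idiomatic
-- what changed: Replaces the single interleaved pass with a toggling flag and mutable counter by four independent filtered comprehensions, selecting elements by block parity (position//6) % 2 computed directly from the position.
import Mathlib
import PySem

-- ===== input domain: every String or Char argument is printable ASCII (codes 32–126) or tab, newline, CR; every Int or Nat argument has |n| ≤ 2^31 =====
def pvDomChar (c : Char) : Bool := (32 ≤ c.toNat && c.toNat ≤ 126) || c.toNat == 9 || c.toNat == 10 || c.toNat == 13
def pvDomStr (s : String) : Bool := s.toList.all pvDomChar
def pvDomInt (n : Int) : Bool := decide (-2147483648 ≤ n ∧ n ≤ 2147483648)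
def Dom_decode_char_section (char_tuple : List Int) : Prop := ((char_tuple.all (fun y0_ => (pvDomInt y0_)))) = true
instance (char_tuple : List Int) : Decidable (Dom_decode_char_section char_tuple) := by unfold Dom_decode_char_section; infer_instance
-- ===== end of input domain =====

-- B replaces A's single interleaved stateful pass (toggling flag + counter) by four
-- independent filtered passes keyed on the block parity (p/6) % 2 of each position.
-- ===== PORT A =====
-- state: (four_chars[0], [1], [2], [3], first_chars, j), fold over char_tuple as in A
def decodeStepA (st : List Int × List Int × List Int × List Int × Bool × Nat) (i : Int) :
    List Int × List Int × List Int × List Int × Bool × Nat :=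
  let (c0, c1, c2, c3, first, j) := st
  let (c0, c1, c2, c3) :=
    if first then
      (c0 ++ [PySem.Int.band (i >>> 0) 3, PySem.Int.band (i >>> 4) 3], c1,
       c2 ++ [PySem.Int.band (i >>> 2) 3, PySem.Int.band (i >>> 6) 3], c3)
    else
      (c0, c1 ++ [PySem.Int.band (i >>> 0) 3, PySem.Int.band (i >>> 4) 3],
       c2, c3 ++ [PySem.Int.band (i >>> 2) 3, PySem.Int.band (i >>> 6) 3])
  let j := j + 1
  let first := if j % 6 == 0 then !first else first
  (c0, c1, c2, c3, first, j)

def decode_char_section (char_tuple : List Int) : List (List Int) :=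
  let st := char_tuple.foldl decodeStepA ([], [], [], [], true, 0)
  [st.1, st.2.1, st.2.2.1, st.2.2.2.1]

-- ===== PORT B =====
-- one filtered comprehension per channel (Source B's `channel(parity, s1, s2)`)
def decodeChanB (char_tuple : List Int) (parity : Nat) (s1 s2 : Int) : List Int :=
  (char_tuple.zipIdx).flatMap (fun (px : Int × Nat) =>
    if (px.2 / 6) % 2 == parity then
      [PySem.Int.band (px.1 >>> s1) 3, PySem.Int.band (px.1 >>> s2) 3]
    else [])

def decode_char_section_alt (char_tuple : List Int) : List (List Int) :=
  [decodeChanB char_tuple 0 0 4, decodeChanB char_tuple 1 0 4,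
   decodeChanB char_tuple 0 2 6, decodeChanB char_tuple 1 2 6]

-- ===== PRECONDITION & SPEC =====
def Spec_decode_char_section (char_tuple : List Int) (out : List (List Int)) : Prop := out = decode_char_section_alt char_tuple
instance (char_tuple : List Int) (out : List (List Int)) : Decidable (Spec_decode_char_section char_tuple out) := by unfold Spec_decode_char_section; infer_instance

-- ===== CLAIM (what is proved, stated in full; the proofs are below) =====
def Claim_equal_decode_char_section : Prop := ∀ (char_tuple : List Int), Dom_decode_char_section char_tuple → Spec_decode_char_section char_tuple (decode_char_section char_tuple)

-- ===== LEMMAS AND PROOFS =====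

-- generalized channel with starting position j (B's channel is chanFrom … 0)
def chanFrom (xs : List Int) (j parity : Nat) (s1 s2 : Int) : List Int :=
  (xs.zipIdx j).flatMap (fun (px : Int × Nat) =>
    if (px.2 / 6) % 2 == parity then
      [PySem.Int.band (px.1 >>> s1) 3, PySem.Int.band (px.1 >>> s2) 3]
    else [])

lemma chanFrom_cons (x : Int) (xs : List Int) (j parity : Nat) (s1 s2 : Int) :
    chanFrom (x :: xs) j parity s1 s2 =
      (if (j / 6) % 2 == parity then
        [PySem.Int.band (x >>> s1) 3, PySem.Int.band (x >>> s2) 3]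
      else []) ++ chanFrom xs (j + 1) parity s1 s2 := by
  simp [chanFrom, List.zipIdx_cons]

lemma toggle_eq (j : Nat) :
    (if (j + 1) % 6 == 0 then !decide ((j / 6) % 2 = 0) else decide ((j / 6) % 2 = 0))
      = decide (((j + 1) / 6) % 2 = 0) := by
  by_cases h : (j + 1) % 6 = 0 <;> by_cases h2 : (j / 6) % 2 = 0 <;>
    simp [h, h2] <;> omega

lemma fold_eq (xs : List Int) : ∀ (j : Nat) (c0 c1 c2 c3 : List Int),
    xs.foldl decodeStepA (c0, c1, c2, c3, decide ((j / 6) % 2 = 0), j) =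
      (c0 ++ chanFrom xs j 0 0 4, c1 ++ chanFrom xs j 1 0 4,
       c2 ++ chanFrom xs j 0 2 6, c3 ++ chanFrom xs j 1 2 6,
       decide (((j + xs.length) / 6) % 2 = 0), j + xs.length) := by
  induction xs with
  | nil => intro j c0 c1 c2 c3; simp [chanFrom]
  | cons x xs ih =>
    intro j c0 c1 c2 c3
    rw [List.foldl_cons]
    have hlen : j + 1 + xs.length = j + (xs.length + 1) := by omega
    by_cases h : (j / 6) % 2 = 0
    · have hb0 : ((j / 6) % 2 == 0) = true := by simp [h]
      have hb1 : ((j / 6) % 2 == 1) = false := by simp [h]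
      have hs : decodeStepA (c0, c1, c2, c3, decide ((j / 6) % 2 = 0), j) x =
          (c0 ++ [PySem.Int.band (x >>> 0) 3, PySem.Int.band (x >>> 4) 3], c1,
           c2 ++ [PySem.Int.band (x >>> 2) 3, PySem.Int.band (x >>> 6) 3], c3,
           decide (((j + 1) / 6) % 2 = 0), j + 1) := by
        simp only [decodeStepA, h, decide_true, if_true, ← toggle_eq j]
      rw [hs, ih]
      simp only [chanFrom_cons, hb0, hb1, if_true, Bool.false_eq_true, if_false, List.nil_append,
        List.append_assoc, List.cons_append, hlen, List.length_cons]
      rfl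
    · have hb0 : ((j / 6) % 2 == 0) = false := by simp [h]
      have hb1 : ((j / 6) % 2 == 1) = true := by simp; omega
      have hs : decodeStepA (c0, c1, c2, c3, decide ((j / 6) % 2 = 0), j) x =
          (c0, c1 ++ [PySem.Int.band (x >>> 0) 3, PySem.Int.band (x >>> 4) 3],
           c2, c3 ++ [PySem.Int.band (x >>> 2) 3, PySem.Int.band (x >>> 6) 3],
           decide (((j + 1) / 6) % 2 = 0), j + 1) := by
        simp only [decodeStepA, h, decide_false, Bool.false_eq_true, if_false, ← toggle_eq j]
      rw [hs, ih]
      simp only [chanFrom_cons, hb0, hb1, if_true, Bool.false_eq_true, if_false, List.nil_append,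
        List.append_assoc, List.cons_append, hlen, List.length_cons]
      rfl

-- ===== VERDICT (by name: the statement is the Claim_ definition above) =====
theorem decode_char_section_spec : Claim_equal_decode_char_section := by
  intro char_tuple _
  unfold Spec_decode_char_section decode_char_section decode_char_section_alt
  have h := fold_eq char_tuple 0 [] [] [] []
  simp only [Nat.zero_div, Nat.zero_mod, decide_true] at h
  simp [h, decodeChanB, chanFrom]
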